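-- pv_equiv track=rewrite | github.com/umoqnier/cl-2026-2-lab | notebooks/2_niveles_linguisticos_II.py | prettify_tags
-- ===== SOURCE A (Python) =====
-- def prettify_tags(word: str) -> str:
--     tags = {
--         "DIM": "[b bright_yellow]DIM[/]",
--         "FEM": "[b green3]FEM[/]",
--         "MSC": "[b medium_purple1]MSC[/]",
--         "PL": "[b deep_sky_blue1]PL[/]",
--     }
--     for tag, pretty_tag in tags.items():
--         word = word.replace(tag, pretty_tag)
--     return word
-- ===== SOURCE B (Python) =====
-- _TAG_STYLES = [
--     ("DIM", "[b bright_yellow]DIM[/]"),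
--     ("FEM", "[b green3]FEM[/]"),
--     ("MSC", "[b medium_purple1]MSC[/]"),
--     ("PL", "[b deep_sky_blue1]PL[/]"),
-- ]
--
--
-- def prettify_tags(word: str) -> str:
--     pieces = []
--     i, n = 0, len(word)
--     while i < n:
--         for tag, styled in _TAG_STYLES:
--             if word.startswith(tag, i):
--                 pieces.append(styled)
--                 i += len(tag)
--                 break
--         else:
--             pieces.append(word[i])
--             i += 1
--     return "".join(pieces)
-- ===== Notes on version B (the rewrite author's own statement) =====
-- stated objective: alternative
-- what changed: A makes four sequential full-string str.replace passes (building three intermediate strings); B does one left-to-right scan, matching the tag table at each position and emitting each replacement or character once.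
import Mathlib
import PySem

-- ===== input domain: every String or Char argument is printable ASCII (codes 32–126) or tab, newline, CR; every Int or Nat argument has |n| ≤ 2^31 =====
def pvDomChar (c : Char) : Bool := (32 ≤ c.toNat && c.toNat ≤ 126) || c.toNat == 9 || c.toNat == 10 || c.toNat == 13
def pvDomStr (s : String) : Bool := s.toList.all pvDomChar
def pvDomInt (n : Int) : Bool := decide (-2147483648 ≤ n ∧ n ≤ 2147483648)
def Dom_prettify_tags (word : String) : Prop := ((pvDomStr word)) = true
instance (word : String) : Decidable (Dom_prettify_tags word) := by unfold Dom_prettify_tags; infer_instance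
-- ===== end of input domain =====

-- B replaces A's four sequential str.replace passes by a single left-to-right scan with a tag
-- table (objective: alternative, same asymptotic cost; equivalence proved for all inputs).

-- ===== PORT A =====
def prettify_tags (word : String) : String :=
  let tags : PySem.Dict String String :=
    ((((PySem.Dict.empty.insert "DIM" "[b bright_yellow]DIM[/]").insert
        "FEM" "[b green3]FEM[/]").insert
        "MSC" "[b medium_purple1]MSC[/]").insert
        "PL" "[b deep_sky_blue1]PL[/]")
  tags.items.foldl (fun w tv => PySem.Str.replace w tv.1 tv.2) word

-- ===== PORT B =====
-- the four replacement strings of Source B's tag table, as character lists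
def pD : List Char := ['[','b',' ','b','r','i','g','h','t','_','y','e','l','l','o','w',']','D','I','M','[','/',']']
def pF : List Char := ['[','b',' ','g','r','e','e','n','3',']','F','E','M','[','/',']']
def pM : List Char := ['[','b',' ','m','e','d','i','u','m','_','p','u','r','p','l','e','1',']','M','S','C','[','/',']']
def pP : List Char := ['[','b',' ','d','e','e','p','_','s','k','y','_','b','l','u','e','1',']','P','L','[','/',']']

def scanTags : List Char → List Char
  | [] => []
  | c :: t =>
    if ['D','I','M'].isPrefixOf (c :: t) then pD ++ scanTags (t.drop 2)
    else if ['F','E','M'].isPrefixOf (c :: t) then pF ++ scanTags (t.drop 2)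
    else if ['M','S','C'].isPrefixOf (c :: t) then pM ++ scanTags (t.drop 2)
    else if ['P','L'].isPrefixOf (c :: t) then pP ++ scanTags (t.drop 1)
    else c :: scanTags t
termination_by l => l.length
decreasing_by all_goals simp


def prettify_tags_alt (word : String) : String := String.ofList (scanTags word.toList)

-- ===== PRECONDITION & SPEC =====
def Spec_prettify_tags (word : String) (out : String) : Prop := out = prettify_tags_alt word
instance (word : String) (out : String) : Decidable (Spec_prettify_tags word out) := by unfold Spec_prettify_tags; infer_instance

-- ===== CLAIM (what is proved, stated in full; the proofs are below) =====
def Claim_equal_prettify_tags : Prop := ∀ (word : String), Dom_prettify_tags word → Spec_prettify_tags word (prettify_tags word)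

-- ===== LEMMAS AND PROOFS =====

def repS (o : Char) (os new : List Char) : List Char → List Char
  | [] => []
  | c :: t =>
    if (o :: os).isPrefixOf (c :: t) then new ++ repS o os new (t.drop os.length)
    else c :: repS o os new t
termination_by l => l.length
decreasing_by all_goals simp

theorem repS_pos {o : Char} {os new : List Char} {c : Char} {t : List Char}
    (h : (o :: os).isPrefixOf (c :: t) = true) :
    repS o os new (c :: t) = new ++ repS o os new (t.drop os.length) := by
  rw [repS]; simp [h]

theorem repS_neg {o : Char} {os new : List Char} {c : Char} {t : List Char}
    (h : (o :: os).isPrefixOf (c :: t) = false) :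
    repS o os new (c :: t) = c :: repS o os new t := by
  rw [repS]; simp [h]

theorem go_eq (o : Char) (os new : List Char) :
    ∀ fuel l acc, l.length ≤ fuel →
      PySem.Chars.replace.go (o :: os) new fuel l acc = acc.reverse ++ repS o os new l := by
  intro fuel
  induction fuel with
  | zero =>
      intro l acc h
      have hl : l = [] := by cases l <;> simp_all
      subst hl
      simp [PySem.Chars.replace.go, repS]
  | succ n ih =>
      intro l acc h
      cases l with
      | nil => simp [PySem.Chars.replace.go, repS]
      | cons c t =>
          by_cases hp : (o :: os).isPrefixOf (c :: t) = true
          · rw [PySem.Chars.replace.go]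
            simp only [hp, if_pos]
            rw [ih _ _ (by simp at h ⊢; omega), repS_pos hp]
            simp
          · have hp' : (o :: os).isPrefixOf (c :: t) = false := by
              simp only [Bool.not_eq_true] at hp; exact hp
            rw [PySem.Chars.replace.go]
            simp only [hp', Bool.false_eq_true, if_neg, not_false_iff]
            rw [ih _ _ (by simp at h ⊢; omega), repS_neg hp']
            simp

theorem replace_eq_repS (l : List Char) (o : Char) (os new : List Char) :
    PySem.Chars.replace l (o :: os) new = repS o os new l := by
  rw [PySem.Chars.replace]
  simp [go_eq o os new l.length l [] le_rfl]

theorem repS_append (o : Char) (os new : List Char) :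
    ∀ p : List Char,
      p.tails.all (fun s => s.isEmpty || (!((o :: os).isPrefixOf s) && !(s.isPrefixOf (o :: os)))) = true →
      ∀ x, repS o os new (p ++ x) = p ++ repS o os new x := by
  intro p
  induction p with
  | nil => intro _ x; simp
  | cons c p' ih =>
      intro hs x
      have hsplit := hs
      rw [List.tails_cons, List.all_cons] at hsplit
      obtain ⟨h1, h2⟩ := (Bool.and_eq_true _ _).mp hsplit
      simp only [List.isEmpty_cons, Bool.false_or, Bool.and_eq_true, Bool.not_eq_true'] at h1
      have hnp : (o :: os).isPrefixOf (c :: (p' ++ x)) = false := by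
        by_contra hne
        have hpre : (o :: os) <+: (c :: p') ++ x := by
          rw [← List.isPrefixOf_iff_prefix]
          have : (o :: os).isPrefixOf (c :: (p' ++ x)) = true := by
            cases hb : (o :: os).isPrefixOf (c :: (p' ++ x)) with
            | false => exact absurd hb hne
            | true => rfl
          simpa using this
        rcases le_total (o :: os).length (c :: p').length with hle | hle
        · have : (o :: os) <+: (c :: p') :=
            List.prefix_of_prefix_length_le hpre (List.prefix_append _ x) hle
          rw [← List.isPrefixOf_iff_prefix] at this
          simp [this] at h1
        · have : (c :: p') <+: (o :: os) :=
            List.prefix_of_prefix_length_le (List.prefix_append _ x) hpre hle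
          rw [← List.isPrefixOf_iff_prefix] at this
          simp [this] at h1
      calc repS o os new ((c :: p') ++ x) = c :: repS o os new (p' ++ x) := repS_neg hnp
        _ = c :: (p' ++ repS o os new x) := by rw [ih h2 x]
        _ = (c :: p') ++ repS o os new x := rfl

theorem repS_transfer (o : Char) (os new : List Char) (hhd : new.head? = some '[') :
    ∀ (l q : List Char), (∀ c ∈ q, c ≠ '[') →
      q <+: repS o os new l → q <+: l := by
  intro l
  induction l with
  | nil => intro q _ h; simpa [repS] using h
  | cons c t ih =>
      intro q hq h
      by_cases hp : (o :: os).isPrefixOf (c :: t) = true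
      · rw [repS_pos hp] at h
        cases q with
        | nil => exact List.nil_prefix
        | cons a q' =>
            exfalso
            cases new with
            | nil => simp at hhd
            | cons n0 nr =>
                have hn0 : n0 = '[' := by simpa using hhd
                have : a = n0 := (List.cons_prefix_cons.mp h).1
                exact hq a List.mem_cons_self (this.trans hn0)
      · have hp' : (o :: os).isPrefixOf (c :: t) = false := by
          simp only [Bool.not_eq_true] at hp; exact hp
        rw [repS_neg hp'] at h
        cases q with
        | nil => exact List.nil_prefix
        | cons a q' =>
            obtain ⟨rfl, h'⟩ := List.cons_prefix_cons.mp h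
            exact List.cons_prefix_cons.mpr
              ⟨rfl, ih q' (fun d hd => hq d (List.mem_cons_of_mem _ hd)) h'⟩

theorem bnot_false {b : Bool} (h : ¬ b = false) : b = true := by
  cases b
  · exact absurd rfl h
  · rfl

theorem repS_miss (o : Char) (os new : List Char) (c : Char) (t : List Char)
    (h : (o == c) = false) :
    repS o os new (c :: t) = c :: repS o os new t :=
  repS_neg (by simp [List.isPrefixOf, h])

theorem hitD (t : List Char) :
    repS 'D' ['I','M'] pD ('D' :: 'I' :: 'M' :: t) = pD ++ repS 'D' ['I','M'] pD t := by
  rw [repS_pos (by simp [List.isPrefixOf])]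
  rfl

theorem hitF (t : List Char) :
    repS 'F' ['E','M'] pF ('F' :: 'E' :: 'M' :: t) = pF ++ repS 'F' ['E','M'] pF t := by
  rw [repS_pos (by simp [List.isPrefixOf])]
  rfl

theorem hitM (t : List Char) :
    repS 'M' ['S','C'] pM ('M' :: 'S' :: 'C' :: t) = pM ++ repS 'M' ['S','C'] pM t := by
  rw [repS_pos (by simp [List.isPrefixOf])]
  rfl

theorem hitP (t : List Char) :
    repS 'P' ['L'] pP ('P' :: 'L' :: t) = pP ++ repS 'P' ['L'] pP t := by
  rw [repS_pos (by simp [List.isPrefixOf])]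
  rfl

set_option maxRecDepth 8192 in
theorem main_eq (l : List Char) :
    repS 'P' ['L'] pP (repS 'M' ['S','C'] pM (repS 'F' ['E','M'] pF (repS 'D' ['I','M'] pD l)))
      = scanTags l := by
  cases l with
  | nil => simp [repS, scanTags]
  | cons c t =>
    by_cases hD : (['D','I','M'] : List Char).isPrefixOf (c :: t) = true
    · rcases List.isPrefixOf_iff_prefix.mp hD with ⟨t', hu⟩
      obtain ⟨rfl, rfl⟩ : c = 'D' ∧ t = 'I' :: 'M' :: t' := by simpa using hu.symm
      rw [hitD t',
          repS_append 'F' ['E','M'] pF pD (by decide) _,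
          repS_append 'M' ['S','C'] pM pD (by decide) _,
          repS_append 'P' ['L'] pP pD (by decide) _,
          main_eq t', scanTags]
      rw [if_pos hD]
      rfl
    · have hD' : (['D','I','M'] : List Char).isPrefixOf (c :: t) = false := by
        simp only [Bool.not_eq_true] at hD; exact hD
      by_cases hF : (['F','E','M'] : List Char).isPrefixOf (c :: t) = true
      · rcases List.isPrefixOf_iff_prefix.mp hF with ⟨t', hu⟩
        obtain ⟨rfl, rfl⟩ : c = 'F' ∧ t = 'E' :: 'M' :: t' := by simpa using hu.symm
        rw [repS_miss 'D' ['I','M'] pD 'F' ('E' :: 'M' :: t') (by decide),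
            repS_miss 'D' ['I','M'] pD 'E' ('M' :: t') (by decide),
            repS_miss 'D' ['I','M'] pD 'M' t' (by decide),
            hitF (repS 'D' ['I','M'] pD t'),
            repS_append 'M' ['S','C'] pM pF (by decide) _,
            repS_append 'P' ['L'] pP pF (by decide) _,
            main_eq t', scanTags]
        rw [if_neg (by simp [hD']), if_pos hF]
        rfl
      · have hF' : (['F','E','M'] : List Char).isPrefixOf (c :: t) = false := by
          simp only [Bool.not_eq_true] at hF; exact hF
        by_cases hM : (['M','S','C'] : List Char).isPrefixOf (c :: t) = true
        · rcases List.isPrefixOf_iff_prefix.mp hM with ⟨t', hu⟩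
          obtain ⟨rfl, rfl⟩ : c = 'M' ∧ t = 'S' :: 'C' :: t' := by simpa using hu.symm
          rw [repS_miss 'D' ['I','M'] pD 'M' ('S' :: 'C' :: t') (by decide),
              repS_miss 'D' ['I','M'] pD 'S' ('C' :: t') (by decide),
              repS_miss 'D' ['I','M'] pD 'C' t' (by decide),
              repS_miss 'F' ['E','M'] pF 'M' ('S' :: 'C' :: repS 'D' ['I','M'] pD t') (by decide),
              repS_miss 'F' ['E','M'] pF 'S' ('C' :: repS 'D' ['I','M'] pD t') (by decide),
              repS_miss 'F' ['E','M'] pF 'C' (repS 'D' ['I','M'] pD t') (by decide),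
              hitM (repS 'F' ['E','M'] pF (repS 'D' ['I','M'] pD t')),
              repS_append 'P' ['L'] pP pM (by decide) _,
              main_eq t', scanTags]
          rw [if_neg (by simp [hD']), if_neg (by simp [hF']), if_pos hM]
          rfl
        · have hM' : (['M','S','C'] : List Char).isPrefixOf (c :: t) = false := by
            simp only [Bool.not_eq_true] at hM; exact hM
          by_cases hP : (['P','L'] : List Char).isPrefixOf (c :: t) = true
          · rcases List.isPrefixOf_iff_prefix.mp hP with ⟨t', hu⟩
            obtain ⟨rfl, rfl⟩ : c = 'P' ∧ t = 'L' :: t' := by simpa using hu.symm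
            rw [repS_miss 'D' ['I','M'] pD 'P' ('L' :: t') (by decide),
                repS_miss 'D' ['I','M'] pD 'L' t' (by decide),
                repS_miss 'F' ['E','M'] pF 'P' ('L' :: repS 'D' ['I','M'] pD t') (by decide),
                repS_miss 'F' ['E','M'] pF 'L' (repS 'D' ['I','M'] pD t') (by decide),
                repS_miss 'M' ['S','C'] pM 'P' ('L' :: repS 'F' ['E','M'] pF (repS 'D' ['I','M'] pD t')) (by decide),
                repS_miss 'M' ['S','C'] pM 'L' (repS 'F' ['E','M'] pF (repS 'D' ['I','M'] pD t')) (by decide),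
                hitP (repS 'M' ['S','C'] pM (repS 'F' ['E','M'] pF (repS 'D' ['I','M'] pD t'))),
                main_eq t', scanTags]
            rw [if_neg (by simp [hD']), if_neg (by simp [hF']), if_neg (by simp [hM']), if_pos hP]
            rfl
          · have hP' : (['P','L'] : List Char).isPrefixOf (c :: t) = false := by
              simp only [Bool.not_eq_true] at hP; exact hP
            have s1 : repS 'D' ['I','M'] pD (c :: t) = c :: repS 'D' ['I','M'] pD t :=
              repS_neg hD'
            have hF2 : (['F','E','M'] : List Char).isPrefixOf
                (c :: repS 'D' ['I','M'] pD t) = false := by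
              by_contra hne
              have hpre := List.isPrefixOf_iff_prefix.mp (bnot_false hne)
              obtain ⟨rfl, h2⟩ := List.cons_prefix_cons.mp hpre
              have h3 : (['E','M'] : List Char) <+: t :=
                repS_transfer 'D' ['I','M'] pD (by decide) t ['E','M'] (by simp) h2
              have : (['F','E','M'] : List Char).isPrefixOf ('F' :: t) = true := by
                rw [List.isPrefixOf_iff_prefix]
                exact List.cons_prefix_cons.mpr ⟨rfl, h3⟩
              simp [this] at hF'
            have s2 : repS 'F' ['E','M'] pF (c :: repS 'D' ['I','M'] pD t)
                = c :: repS 'F' ['E','M'] pF (repS 'D' ['I','M'] pD t) := repS_neg hF2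
            have hM2 : (['M','S','C'] : List Char).isPrefixOf
                (c :: repS 'F' ['E','M'] pF (repS 'D' ['I','M'] pD t)) = false := by
              by_contra hne
              have hpre := List.isPrefixOf_iff_prefix.mp (bnot_false hne)
              obtain ⟨rfl, h2⟩ := List.cons_prefix_cons.mp hpre
              have h3 : (['S','C'] : List Char) <+: t :=
                repS_transfer 'D' ['I','M'] pD (by decide) t ['S','C'] (by simp)
                  (repS_transfer 'F' ['E','M'] pF (by decide) _ ['S','C'] (by simp) h2)
              have : (['M','S','C'] : List Char).isPrefixOf ('M' :: t) = true := by
                rw [List.isPrefixOf_iff_prefix]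
                exact List.cons_prefix_cons.mpr ⟨rfl, h3⟩
              simp [this] at hM'
            have s3 : repS 'M' ['S','C'] pM (c :: repS 'F' ['E','M'] pF (repS 'D' ['I','M'] pD t))
                = c :: repS 'M' ['S','C'] pM (repS 'F' ['E','M'] pF (repS 'D' ['I','M'] pD t)) :=
              repS_neg hM2
            have hP2 : (['P','L'] : List Char).isPrefixOf
                (c :: repS 'M' ['S','C'] pM (repS 'F' ['E','M'] pF (repS 'D' ['I','M'] pD t)))
                = false := by
              by_contra hne
              have hpre := List.isPrefixOf_iff_prefix.mp (bnot_false hne)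
              obtain ⟨rfl, h2⟩ := List.cons_prefix_cons.mp hpre
              have h3 : (['L'] : List Char) <+: t :=
                repS_transfer 'D' ['I','M'] pD (by decide) t ['L'] (by simp)
                  (repS_transfer 'F' ['E','M'] pF (by decide) _ ['L'] (by simp)
                    (repS_transfer 'M' ['S','C'] pM (by decide) _ ['L'] (by simp) h2))
              have : (['P','L'] : List Char).isPrefixOf ('P' :: t) = true := by
                rw [List.isPrefixOf_iff_prefix]
                exact List.cons_prefix_cons.mpr ⟨rfl, h3⟩
              simp [this] at hP'
            have s4 : repS 'P' ['L'] pP (c :: repS 'M' ['S','C'] pM (repS 'F' ['E','M'] pF (repS 'D' ['I','M'] pD t)))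
                = c :: repS 'P' ['L'] pP (repS 'M' ['S','C'] pM (repS 'F' ['E','M'] pF (repS 'D' ['I','M'] pD t))) :=
              repS_neg hP2
            rw [s1, s2, s3, s4, main_eq t, scanTags]
            simp [hD', hF', hM', hP']
termination_by l.length
decreasing_by
  all_goals subst_vars
  all_goals simp
  all_goals omega

-- ===== VERDICT (by name: the statement is the Claim_ definition above) =====
theorem prettify_tags_spec : Claim_equal_prettify_tags := by
  intro word _
  show prettify_tags word = prettify_tags_alt word
  have hA : prettify_tags word =
      PySem.Str.replace (PySem.Str.replace (PySem.Str.replace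
        (PySem.Str.replace word "DIM" "[b bright_yellow]DIM[/]")
        "FEM" "[b green3]FEM[/]") "MSC" "[b medium_purple1]MSC[/]") "PL" "[b deep_sky_blue1]PL[/]" := rfl
  rw [hA]
  simp only [PySem.Str.replace, String.toList_ofList]
  simp only [show "DIM".toList = ['D','I','M'] from rfl,
    show "FEM".toList = ['F','E','M'] from rfl,
    show "MSC".toList = ['M','S','C'] from rfl,
    show "PL".toList = ['P','L'] from rfl,
    show "[b bright_yellow]DIM[/]".toList = pD from rfl,
    show "[b green3]FEM[/]".toList = pF from rfl,
    show "[b medium_purple1]MSC[/]".toList = pM from rfl,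
    show "[b deep_sky_blue1]PL[/]".toList = pP from rfl]
  rw [replace_eq_repS, replace_eq_repS, replace_eq_repS, replace_eq_repS, main_eq]
  rfl
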